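-- pv_equiv track=rewrite | github.com/qmlCoder/pywfn | protos/Flebedev.py | intge_str
-- ===== SOURCE A (Python) =====
-- tab='    '
--
-- def intge_str(xs):
--     res=''
--     for i,x in enumerate(xs):
--         res+=f'{x:<3.0f}'
--         if i!=len(xs)-1:res+=','
--         if (i+1)%20==0:res+=f'&\n{tab}'
--     res=f'{res}]'
--     return res
-- ===== SOURCE B (Python) =====
-- tab='    '
--
-- def intge_str(xs):
--     toks = [f'{x:<3.0f}' for x in xs]
--     rows = []
--     i = 0
--     while i < len(toks):
--         rows.append(','.join(toks[i:i+20]))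
--         i += 20
--     body = f',&\n{tab}'.join(rows)
--     if rows and len(xs) % 20 == 0:
--         body += f'&\n{tab}'
--     return body + ']'
-- ===== Notes on version B (the rewrite author's own statement) =====
-- stated objective: idiomatic
-- what changed: Replaces the single character-accumulating loop with per-index conditionals by a token list that is chunked into rows of 20, each row joined with ',' and the rows joined with ',&\n ', with one explicit append for the trailing row break when the length is a nonzero multiple of 20.
import Mathlib
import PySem

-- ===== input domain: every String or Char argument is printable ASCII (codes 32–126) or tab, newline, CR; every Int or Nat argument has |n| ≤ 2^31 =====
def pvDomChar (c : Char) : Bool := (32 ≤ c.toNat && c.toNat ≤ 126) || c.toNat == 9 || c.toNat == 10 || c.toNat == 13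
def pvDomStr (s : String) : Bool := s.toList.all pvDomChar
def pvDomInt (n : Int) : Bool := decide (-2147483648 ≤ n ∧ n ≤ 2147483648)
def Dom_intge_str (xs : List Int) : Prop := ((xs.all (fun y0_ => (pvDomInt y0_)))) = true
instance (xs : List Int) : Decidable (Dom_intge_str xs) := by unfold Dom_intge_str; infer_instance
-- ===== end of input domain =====

-- B reformulates A's single character-accumulating loop as tokens chunked into rows of 20 joined with ',' and ',&\n    ' (same O(n) cost, no speed claim).

-- tab = '    '
def pvTab : List Char := [' ', ' ', ' ', ' ']
-- '&\n' + tab, the row-break text both programs emit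
def pvSep : List Char := ['&', '\n'] ++ pvTab
-- f'{x:<3.0f}' : for an integer x with |x| ≤ 2^31 the float is exact and '.0f' prints
-- exactly str(x); '<3' left-justifies to width 3 with spaces (hand port, exact on Dom)
def pvFmt (x : Int) : List Char :=
  let s := PySem.Int.toChars x
  s ++ List.replicate (3 - s.length) ' '

-- ===== PORT A =====
def intge_str (xs : List Int) : String :=
  let res : List Char :=
    (PySem.List.enumerate xs).foldl (fun res p =>
      let res := res ++ pvFmt p.2
      let res := if p.1 ≠ PySem.List.len xs - 1 then res ++ [','] else res
      if PySem.Int.mod (p.1 + 1) 20 = 0 then res ++ pvSep else res) []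
  String.ofList (res ++ [']'])

-- ===== PORT B =====
-- the while loop: while i < len(toks): rows.append(','.join(toks[i:i+20])); i += 20
def pvRowsAux (toks : List (List Char)) (i : Nat) : List (List Char) :=
  if _h : i < toks.length then
    PySem.Chars.join [','] (PySem.List.slice toks (some (i : Int)) (some ((i : Int) + 20))) ::
      pvRowsAux toks (i + 20)
  else []
  termination_by toks.length - i

def intge_str_alt (xs : List Int) : String :=
  let toks := xs.map pvFmt
  let rows := pvRowsAux toks 0
  let body := PySem.Chars.join ([','] ++ pvSep) rows
  let body := if rows ≠ [] ∧ PySem.Int.mod (PySem.List.len xs) 20 = 0 then body ++ pvSep else body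
  String.ofList (body ++ [']'])

-- ===== PRECONDITION & SPEC =====
def Spec_intge_str (xs : List Int) (out : String) : Prop := out = intge_str_alt xs
instance (xs : List Int) (out : String) : Decidable (Spec_intge_str xs out) := by unfold Spec_intge_str; infer_instance

-- ===== CLAIM (what is proved, stated in full; the proofs are below) =====
def Claim_equal_intge_str : Prop := ∀ (xs : List Int), Dom_intge_str xs → Spec_intge_str xs (intge_str xs)

-- ===== LEMMAS AND PROOFS =====

-- A's loop body, per element, as a flatMap over the enumerated token list
def pvF (n : Int) (ts : List (List Char)) (s : Int) : List Char :=
  (PySem.List.enumerate ts s).flatMap (fun p =>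
    p.2 ++ (if p.1 ≠ n - 1 then [','] else []) ++
      (if PySem.Int.mod (p.1 + 1) 20 = 0 then pvSep else []))

theorem pvF_nil (n s : Int) : pvF n [] s = [] := by
  simp [pvF, PySem.List.enumerate]

theorem pvF_cons (n s : Int) (t : List Char) (ts : List (List Char)) :
    pvF n (t :: ts) s =
      (t ++ (if s ≠ n - 1 then [','] else []) ++
        (if PySem.Int.mod (s + 1) 20 = 0 then pvSep else [])) ++ pvF n ts (s + 1) := by
  simp [pvF, PySem.List.enumerate_cons]

theorem pvF_append (n s : Int) (as bs : List (List Char)) :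
    pvF n (as ++ bs) s = pvF n as s ++ pvF n bs (s + as.length) := by
  simp [pvF, PySem.List.enumerate_append]

-- A's fold equals pvF
theorem pvFoldA (n : Int) : ∀ (l : List Int) (s : Int) (acc : List Char),
    (PySem.List.enumerate l s).foldl (fun res p =>
      let res := res ++ pvFmt p.2
      let res := if p.1 ≠ n - 1 then res ++ [','] else res
      if PySem.Int.mod (p.1 + 1) 20 = 0 then res ++ pvSep else res) acc
    = acc ++ pvF n (l.map pvFmt) s := by
  intro l
  induction l with
  | nil => intro s acc; simp [PySem.List.enumerate, pvF_nil]
  | cons x l ih =>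
      intro s acc
      rw [PySem.List.enumerate_cons]
      simp only [List.foldl_cons, List.map_cons, pvF_cons, ih]
      split_ifs <;> simp

-- shifting a whole block of 20 positions changes nothing
theorem pvF_shift (n : Int) : ∀ (ts : List (List Char)) (s : Int),
    pvF n ts s = pvF (n - 20) ts (s - 20) := by
  intro ts
  induction ts with
  | nil => intro s; simp [pvF_nil]
  | cons t ts ih =>
      intro s
      rw [pvF_cons, pvF_cons, ih (s + 1)]
      have h2 : PySem.Int.mod (s + 1) 20 = PySem.Int.mod (s - 20 + 1) 20 := by
        simp only [PySem.Int.mod_eq_emod_of_pos (show (0:Int) < 20 by norm_num)]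
        omega
      have e : s + 1 - 20 = s - 20 + 1 := by ring
      rw [e, h2]
      simp only [show (s ≠ n - 1) ↔ (s - 20 ≠ n - 20 - 1) from by omega]

-- no index is the last one and none ends a row: every element gets exactly a comma
theorem pvF_plain (n : Int) : ∀ (ts : List (List Char)) (s : Int),
    (∀ k : Nat, k < ts.length → (s + k ≠ n - 1) ∧ PySem.Int.mod (s + k + 1) 20 ≠ 0) →
    pvF n ts s = ts.flatMap (· ++ [',']) := by
  intro ts
  induction ts with
  | nil => intro s _; simp [pvF_nil]
  | cons t ts ih =>
      intro s h
      have h0 := h 0 (by simp)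
      rw [pvF_cons, ih (s + 1) (fun k hk => by
        have := h (k + 1) (by simpa using Nat.succ_lt_succ hk)
        constructor
        · have := this.1; push_cast at this ⊢; omega
        · have := this.2; push_cast at this ⊢; convert this using 2; omega)]
      simp at h0
      rw [if_pos (by simpa using h0.1), if_neg (by simpa using h0.2)]
      simp

theorem pvJoin_append_singleton : ∀ (init : List (List Char)) (last : List Char),
    PySem.Chars.join [','] (init ++ [last]) = init.flatMap (· ++ [',']) ++ last := by
  intro init
  induction init with
  | nil => intro last; simp [PySem.Chars.join_singleton]
  | cons a init ih =>
      intro last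
      cases init with
      | nil => simp [PySem.Chars.join_cons_cons, PySem.Chars.join_singleton]
      | cons b init =>
          rw [show (a :: b :: init) ++ [last] = a :: ((b :: init) ++ [last]) from rfl,
              show a :: ((b :: init) ++ [last]) = a :: b :: (init ++ [last]) from by simp,
              PySem.Chars.join_cons_cons, ← List.cons_append, ih]
          simp

-- last chunk: n = s + len, 0 < len ≤ 20, s a multiple of 20
theorem pvF_last_chunk (ts : List (List Char)) (s n : Int)
    (hne : ts ≠ []) (hle : ts.length ≤ 20) (_hs0 : 0 ≤ s)
    (hmod : PySem.Int.mod s 20 = 0) (hn : n = s + (ts.length : Int)) :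
    pvF n ts s =
      PySem.Chars.join [','] ts ++ (if ts.length = 20 then pvSep else []) := by
  subst hn
  rcases List.eq_nil_or_concat ts with rfl | ⟨init, last, rfl⟩
  · exact absurd rfl hne
  · rw [List.concat_eq_append] at hne hle ⊢
    have hs : s % 20 = 0 := by
      rw [← PySem.Int.mod_eq_emod_of_pos (show (0:Int) < 20 by norm_num)]; exact hmod
    have hinit : init.length ≤ 19 := by simp at hle; omega
    rw [pvF_append, pvF_plain _ init s ?hplain, pvF_cons, pvF_nil, pvJoin_append_singleton]
    case hplain =>
      intro k hk
      constructor
      · simp only [List.length_append, List.length_cons, List.length_nil]; push_cast; omega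
      · rw [PySem.Int.mod_eq_emod_of_pos (show (0:Int) < 20 by norm_num)]
        omega
    by_cases hm : init.length = 19
    · rw [if_neg (by simp only [List.length_append, List.length_cons, List.length_nil]; push_cast; omega),
          if_pos (by rw [PySem.Int.mod_eq_emod_of_pos (show (0:Int) < 20 by norm_num)]
                     omega),
          if_pos (by simp [hm])]
      simp
    · rw [if_neg (by simp only [List.length_append, List.length_cons, List.length_nil]; push_cast; omega),
          if_neg (by rw [PySem.Int.mod_eq_emod_of_pos (show (0:Int) < 20 by norm_num)]
                     omega),
          if_neg (by simp; omega)]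
      simp

-- a full non-final chunk of 20: comma and row break after the 20th element
theorem pvF_full_chunk (ts : List (List Char)) (s n : Int)
    (hlen : ts.length = 20) (_hs0 : 0 ≤ s)
    (hmod : PySem.Int.mod s 20 = 0) (hlt : s + 20 < n) :
    pvF n ts s = PySem.Chars.join [','] ts ++ [','] ++ pvSep := by
  rcases List.eq_nil_or_concat ts with rfl | ⟨init, last, rfl⟩
  · simp at hlen
  · rw [List.concat_eq_append] at hlen ⊢
    have hs : s % 20 = 0 := by
      rw [← PySem.Int.mod_eq_emod_of_pos (show (0:Int) < 20 by norm_num)]; exact hmod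
    have hinit : init.length = 19 := by simp at hlen; omega
    rw [pvF_append, pvF_plain _ init s ?hplain, pvF_cons, pvF_nil, pvJoin_append_singleton]
    case hplain =>
      intro k hk
      constructor
      · omega
      · rw [PySem.Int.mod_eq_emod_of_pos (show (0:Int) < 20 by norm_num)]
        omega
    rw [if_pos (by omega),
        if_pos (by rw [PySem.Int.mod_eq_emod_of_pos (show (0:Int) < 20 by norm_num)]
                   push_cast [hinit]; omega)]
    simp

-- proof-side view of the row loop: structural chunking by take/drop
def pvRows : List (List Char) → List (List Char)
  | [] => []
  | t :: ts =>
      PySem.Chars.join [','] (PySem.List.slice (t :: ts) none (some 20)) ::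
        pvRows (PySem.List.slice (t :: ts) (some 20) none)
  termination_by ts => ts.length
  decreasing_by
    simp [PySem.List.slice_from (t :: ts) (by norm_num : (0:Int) ≤ 20)]

theorem pvRows_nil : pvRows [] = [] := by rw [pvRows]

theorem pvRows_cons (t : List Char) (ts : List (List Char)) :
    pvRows (t :: ts) =
      PySem.Chars.join [','] (PySem.List.slice (t :: ts) none (some 20)) ::
        pvRows (PySem.List.slice (t :: ts) (some 20) none) := by rw [pvRows]

theorem pvRows_nil_iff (ts : List (List Char)) : pvRows ts = [] ↔ ts = [] := by
  cases ts with
  | nil => simp [pvRows_nil]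
  | cons t ts => simp [pvRows_cons]

theorem pvRows_small (ts : List (List Char)) (hne : ts ≠ []) (hle : ts.length ≤ 20) :
    pvRows ts = [PySem.Chars.join [','] ts] := by
  cases ts with
  | nil => exact absurd rfl hne
  | cons t ts' =>
      rw [pvRows_cons, PySem.List.slice_to _ (by norm_num : (0:Int) ≤ 20),
          PySem.List.slice_from _ (by norm_num : (0:Int) ≤ 20)]
      simp only [show Int.toNat 20 = 20 from rfl]
      rw [List.take_of_length_le (by simpa using hle),
          List.drop_eq_nil_of_le (by simpa using hle), pvRows_nil]

theorem pvRows_unfold (ts : List (List Char)) (h : ts ≠ []) :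
    pvRows ts = PySem.Chars.join [','] (ts.take 20) :: pvRows (ts.drop 20) := by
  cases ts with
  | nil => exact absurd rfl h
  | cons t ts' =>
      rw [pvRows_cons, PySem.List.slice_to _ (by norm_num : (0:Int) ≤ 20),
          PySem.List.slice_from _ (by norm_num : (0:Int) ≤ 20)]
      simp only [show Int.toNat 20 = 20 from rfl]

theorem pvRowsAux_eq (toks : List (List Char)) :
    ∀ (k i : Nat), toks.length - i = k → pvRowsAux toks i = pvRows (toks.drop i) := by
  intro k
  induction k using Nat.strong_induction_on with
  | _ k ih =>
    intro i hk
    by_cases h : i < toks.length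
    · rw [pvRowsAux, dif_pos h,
          show ((i : Int) + 20) = ((i : Int) + ((20 : Nat) : Int)) by norm_num,
          PySem.List.slice_natCast_add,
          ih (toks.length - (i + 20)) (by omega) (i + 20) rfl,
          pvRows_unfold (toks.drop i) (by simp [List.drop_eq_nil_iff]; omega),
          List.drop_drop]
    · rw [pvRowsAux, dif_neg h, List.drop_eq_nil_of_le (by omega), pvRows_nil]

-- the main equation, by strong induction in steps of 20
theorem pvMain : ∀ (m : Nat) (ts : List (List Char)), ts.length = m →
    pvF (ts.length) ts 0 =
      PySem.Chars.join ([','] ++ pvSep) (pvRows ts) ++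
        (if pvRows ts ≠ [] ∧ PySem.Int.mod (ts.length) 20 = 0 then pvSep else []) := by
  intro m
  induction m using Nat.strong_induction_on with
  | _ m ih =>
    intro ts hm
    rcases eq_or_ne ts [] with rfl | hne
    · simp [pvF_nil, pvRows_nil, PySem.Chars.join_nil]
    by_cases hle : ts.length ≤ 20
    · -- a single (final) row
      rw [pvRows_small ts hne hle, PySem.Chars.join_singleton,
          pvF_last_chunk ts 0 _ hne hle le_rfl (by decide) (by ring)]
      have hpos : 0 < ts.length := List.length_pos_iff.mpr hne
      by_cases h20 : ts.length = 20
      · rw [if_pos h20, if_pos ⟨by simp, by rw [h20]; decide⟩]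
      · rw [if_neg h20, if_neg (by
          rintro ⟨-, hc⟩
          rw [PySem.Int.mod_eq_emod_of_pos (show (0:Int) < 20 by norm_num)] at hc
          omega)]
    · -- a full row of 20 followed by the rest
      replace hle := lt_of_not_ge hle
      obtain ⟨c, hc⟩ : ∃ c, ts.take 20 = c := ⟨_, rfl⟩
      obtain ⟨r, hr⟩ : ∃ r, ts.drop 20 = r := ⟨_, rfl⟩
      have hts : ts = c ++ r := by rw [← hc, ← hr, List.take_append_drop]
      have hcl : c.length = 20 := by rw [← hc, List.length_take]; omega
      have hrl : r.length = ts.length - 20 := by rw [← hr]; simp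
      have hrne : r ≠ [] := by
        intro h; rw [h] at hrl; simp at hrl; omega
      have hrows : pvRows ts = PySem.Chars.join [','] c :: pvRows r := by
        rw [pvRows_unfold ts hne, hc, hr]
      have hmodeq : PySem.Int.mod (ts.length : Int) 20 = PySem.Int.mod (r.length : Int) 20 := by
        simp only [PySem.Int.mod_eq_emod_of_pos (show (0:Int) < 20 by norm_num)]
        omega
      have hF : pvF (ts.length : Int) ts 0 =
          pvF (ts.length : Int) c 0 ++ pvF (ts.length : Int) r (0 + (c.length : Int)) := by
        conv_lhs => rw [show pvF (ts.length : Int) ts 0 = pvF (ts.length : Int) (c ++ r) 0 by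
          rw [← hts]]
        exact pvF_append _ _ c r
      have hrpos : 0 < r.length := List.length_pos_iff.mpr hrne
      have hlt20 : (0:Int) + 20 < (ts.length : Int) := by push_cast; omega
      rw [hF, hcl,
          pvF_full_chunk c 0 _ hcl le_rfl (by decide) hlt20,
          show (0:Int) + ((20:Nat):Int) = 20 by norm_num, pvF_shift _ r 20,
          show (20:Int) - 20 = 0 by ring,
          show ((ts.length : Int)) - 20 = ((r.length : Int)) by omega,
          ih r.length (by omega) r rfl, hrows]
      obtain ⟨y, rest, hpr⟩ : ∃ y rest, pvRows r = y :: rest := by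
        cases h : pvRows r with
        | nil => exact absurd ((pvRows_nil_iff r).mp h) hrne
        | cons a b => exact ⟨a, b, rfl⟩
      rw [hpr, PySem.Chars.join_cons_cons, hmodeq]
      by_cases hmr : PySem.Int.mod (r.length : Int) 20 = 0
      · rw [if_pos ⟨by simp, hmr⟩, if_pos ⟨by simp, hmr⟩]
        simp [List.append_assoc]
      · rw [if_neg (by rintro ⟨-, h⟩; exact hmr h), if_neg (by rintro ⟨-, h⟩; exact hmr h)]
        simp [List.append_assoc]

-- ===== VERDICT (by name: the statement is the Claim_ definition above) =====
theorem intge_str_spec : Claim_equal_intge_str := by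
  intro xs _
  unfold Spec_intge_str intge_str intge_str_alt
  have hlen : PySem.List.len xs = ((xs.map pvFmt).length : Int) := by
    simp [PySem.List.len_eq]
  have hbridge : pvRowsAux (xs.map pvFmt) 0 = pvRows (xs.map pvFmt) := by
    rw [pvRowsAux_eq (xs.map pvFmt) (xs.map pvFmt).length 0 rfl, List.drop_zero]
  dsimp only
  rw [pvFoldA (PySem.List.len xs) xs 0 [], List.nil_append, hbridge, hlen,
      pvMain (xs.map pvFmt).length (xs.map pvFmt) rfl]
  split_ifs <;> simp
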